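-- pv_equiv track=rewrite | github.com/ebentley17/algorithms-for-biology | big-o/solutions/03-find-kmer-clumps-code.py | clumping_kmers
-- ===== SOURCE A (Python) =====
-- def clumping_kmers(genome, kmer_length, window_length, min_kmer_count):
--     '''
--     This function finds clusters of k-mers in a genome.
--
--     * Accepts as input:
--         * `genome` — a string representing the genome of an organism.
--         * `kmer_length` - an integer representing the length of the k-mers to be considered for clumping.
--         * `window_size` — an integer representing the size of the "region of interest".
--         * `min_kmer_count` – an integer representing the minimum number of duplicate k-mers found within `window_size` of each other to be considered a cluster.
--
--     * Returns as output:
--         * A dictionary mapping all the k-mers that satisfy the clustering criteria to a list of all the start locations within `genome` for those clusters.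
--         * Each position in the list should be a start location of the k-mer satisfying the clustering criteria.
--             * For example, consider the genome `'ATATGATGATAT'` the 3-mer `'ATG'` a `window_length` of 10, and a `min_kmer_count`of 2.
--             * In reality, we could map this window to all the positions `[0, 1, 2]` — but all of these positions contain the SAME cluster, and the most relevant of those positions is `2` because it is the start of the first copy of our k-mer `'ATG'`.
--                 * Including positions 0 and 1 in our solution would be both redundant and less useful in subsequent analysis.
--     '''
--     # Collect all the unique kmers and where they occur
--     kmers = {}
--     for start_position in range(len(genome) - kmer_length + 1):
--         kmer = genome[start_position:start_position+kmer_length]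
--         if kmer not in kmers:
--             kmers[kmer] = []
--
--         kmers[kmer].append(start_position)
--
--     # For each kmer and it's locations determine if they meet
--     # the min-count within the window length.
--     candidate_kmers = {}
--     for kmer, locations in kmers.items():
--         if len(locations) < min_kmer_count:
--             continue
--
--         cluster_window_start_points = []
--
--         start_pos = 0
--         start_val = locations[start_pos]
--         for end_pos in range(0, len(locations)):
--             end_val = locations[end_pos]
--
--             # advance the start position until it's
--             # within window_length of the end pos
--             while (end_val + kmer_length) - start_val >= window_length:
--                 start_pos += 1
--                 start_val = locations[start_pos]
--
--             # if there are at least min_kmer_count in this window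
--             # it's a candidate
--             if (end_pos - start_pos) + 1 > min_kmer_count:
--                 cluster_window_start_points.append(start_val)
--
--         # If we found at least one window for this kmer, add them.
--         if len(cluster_window_start_points) > 0:
--             candidate_kmers[kmer] = cluster_window_start_points
--
--     return candidate_kmers
-- ===== SOURCE B (Python) =====
-- def _bisect_right(a, x):
--     # hand-rolled bisect_right (no imports allowed beyond A's, which has none)
--     lo, hi = 0, len(a)
--     while lo < hi:
--         mid = (lo + hi) // 2
--         if a[mid] <= x:
--             lo = mid + 1
--         else:
--             hi = mid
--     return lo
--
--
-- def clumping_kmers(genome, kmer_length, window_length, min_kmer_count):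
--     # Phase 1 (unchanged): map each k-mer to its (increasing) list of start positions.
--     kmers = {}
--     for start_position in range(len(genome) - kmer_length + 1):
--         kmer = genome[start_position:start_position + kmer_length]
--         if kmer not in kmers:
--             kmers[kmer] = []
--         kmers[kmer].append(start_position)
--
--     # Phase 2: instead of a stateful two-pointer sweep, locate the window-left
--     # index for each end position independently by binary search.
--     candidate_kmers = {}
--     for kmer, locations in kmers.items():
--         if len(locations) < min_kmer_count:
--             continue
--         cluster_window_start_points = []
--         for end_pos in range(len(locations)):
--             threshold = locations[end_pos] + kmer_length - window_length
--             i = _bisect_right(locations, threshold)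
--             start_val = locations[i]
--             if (end_pos - i) + 1 > min_kmer_count:
--                 cluster_window_start_points.append(start_val)
--         if len(cluster_window_start_points) > 0:
--             candidate_kmers[kmer] = cluster_window_start_points
--     return candidate_kmers
-- ===== Notes on version B (the rewrite author's own statement) =====
-- stated objective: alternative
-- what changed: Phase 2's stateful two-pointer sweep (a while-loop advancing a persistent start index across end positions) is replaced by an independent hand-rolled binary search (bisect_right) over each k-mer's sorted location list to find the window-left index for every end position.
import Mathlib
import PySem

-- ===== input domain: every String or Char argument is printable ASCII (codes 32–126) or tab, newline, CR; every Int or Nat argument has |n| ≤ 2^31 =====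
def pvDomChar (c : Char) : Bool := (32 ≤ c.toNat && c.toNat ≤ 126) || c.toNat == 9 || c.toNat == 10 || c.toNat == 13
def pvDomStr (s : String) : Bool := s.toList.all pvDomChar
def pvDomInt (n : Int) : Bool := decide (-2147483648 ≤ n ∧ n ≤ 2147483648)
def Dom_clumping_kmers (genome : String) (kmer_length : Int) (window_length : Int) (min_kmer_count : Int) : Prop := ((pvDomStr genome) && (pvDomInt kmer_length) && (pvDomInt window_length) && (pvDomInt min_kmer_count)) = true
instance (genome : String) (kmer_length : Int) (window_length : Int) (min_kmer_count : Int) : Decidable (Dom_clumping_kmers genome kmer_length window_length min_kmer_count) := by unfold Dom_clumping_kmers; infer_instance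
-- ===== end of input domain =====

-- B replaces A's stateful two-pointer sweep by an independent binary search per end
-- position (objective: alternative decomposition, similar cost); phase 1 is shared.

-- ===== PORT A =====
-- genome[s:s+k] (shared by both phases/ports)
def pvKmerAt (genome : String) (k : Int) (s : Int) : String :=
  PySem.Str.slice genome (some s) (some (s + k))

-- Phase 1 of BOTH Pythons (identical code in Source A and Source B): kmer -> list of start
-- positions.  'if kmer not in kmers: kmers[kmer] = []' followed by append is exactly
-- d[kmer] = d.get(kmer, []) + [s], i.e. Dict.modify.
def pvBuildKmers (genome : String) (k : Int) : PySem.Dict String (List Int) :=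
  (PySem.List.pyRange 0 (PySem.Str.len genome - k + 1) 1).foldl
    (fun d s => d.modify (pvKmerAt genome k s) [] (fun l => l ++ [s])) PySem.Dict.empty

-- A's inner 'while (end_val + kmer_length) - start_val >= window_length' loop.
-- 'locations[start_pos]' after the increment: the none branch is Python's IndexError
-- (excluded by Pre_), where a junk value is returned.
def pvAdvance (locs : List Int) (k : Int) (W : Int) (ev : Int) (sp : Nat) (sv : Int) :
    Nat × Int :=
  if (ev + k) - sv ≥ W then
    match h : locs[sp + 1]? with
    | some v => pvAdvance locs k W ev (sp + 1) v
    | none => (sp + 1, 0)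
  else (sp, sv)
termination_by locs.length - sp
decreasing_by
  have : sp + 1 < locs.length := (List.getElem?_eq_some_iff.mp h).1
  omega

def clumping_kmers (genome : String) (kmer_length : Int) (window_length : Int) (min_kmer_count : Int) : List (String × List Int) :=
  let kmers := pvBuildKmers genome kmer_length
  let candidate_kmers := kmers.items.foldl
    (fun (out : PySem.Dict String (List Int)) kv =>
      let locations := kv.2
      if PySem.List.len locations < min_kmer_count then out
      else
        -- start_pos = 0; start_val = locations[start_pos] (in range: every kmer occurs)
        let st0 : Nat × Int × List Int := (0, PySem.List.pyGetD locations 0 0, [])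
        let res := (PySem.List.pyRange 0 (PySem.List.len locations) 1).foldl
          (fun st ep =>
            let ev := PySem.List.pyGetD locations ep 0
            let p := pvAdvance locations kmer_length window_length ev st.1 st.2.1
            if (ep - (p.1 : Int)) + 1 > min_kmer_count then (p.1, p.2, st.2.2 ++ [p.2])
            else (p.1, p.2, st.2.2))
          st0
        if 0 < res.2.2.length then out.insert kv.1 res.2.2 else out)
    PySem.Dict.empty
  candidate_kmers.items

-- ===== PORT B =====
-- Source B's hand-rolled _bisect_right; a[mid] via getD is exact (0 <= lo <= mid < hi <= len
-- whenever it is read), and (lo+hi)//2 on nonnegative ints is Nat division.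
def pvBisectRight (a : List Int) (x : Int) (lo : Nat) (hi : Nat) : Nat :=
  if lo < hi then
    let mid := (lo + hi) / 2
    if a.getD mid 0 ≤ x then pvBisectRight a x (mid + 1) hi
    else pvBisectRight a x lo mid
  else lo
termination_by hi - lo
decreasing_by all_goals omega

def clumping_kmers_alt (genome : String) (kmer_length : Int) (window_length : Int) (min_kmer_count : Int) : List (String × List Int) :=
  let kmers := pvBuildKmers genome kmer_length
  let candidate_kmers := kmers.items.foldl
    (fun (out : PySem.Dict String (List Int)) kv =>
      let locations := kv.2
      if PySem.List.len locations < min_kmer_count then out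
      else
        let pts := (PySem.List.pyRange 0 (PySem.List.len locations) 1).foldl
          (fun acc ep =>
            let threshold := PySem.List.pyGetD locations ep 0 + kmer_length - window_length
            let i := pvBisectRight locations threshold 0 locations.length
            -- locations[i]: IndexError exactly when i = len (excluded by Pre_)
            let sv := PySem.List.pyGetD locations (i : Int) 0
            if (ep - (i : Int)) + 1 > min_kmer_count then acc ++ [sv] else acc)
          []
        if 0 < pts.length then out.insert kv.1 pts else out)
    PySem.Dict.empty
  candidate_kmers.items

-- ===== PRECONDITION & SPEC =====
-- Pre_ excludes exactly the inputs where A raises IndexError (kmer_length >=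
-- window_length while some k-mer occurs at least min_kmer_count times, so the
-- two-pointer runs past the end of its locations list); B raises IndexError there too.
def Pre_clumping_kmers (genome : String) (kmer_length : Int) (window_length : Int) (min_kmer_count : Int) : Prop :=
  kmer_length < window_length ∨
    ∀ i ∈ PySem.List.pyRange 0 (PySem.Str.len genome - kmer_length + 1) 1,
      ((PySem.List.pyRange 0 (PySem.Str.len genome - kmer_length + 1) 1).countP
        (fun j => PySem.Str.slice genome (some j) (some (j + kmer_length)) ==
                  PySem.Str.slice genome (some i) (some (i + kmer_length))) : Int)
        < min_kmer_count

instance (genome : String) (kmer_length : Int) (window_length : Int) (min_kmer_count : Int) : Decidable (Pre_clumping_kmers genome kmer_length window_length min_kmer_count) := by unfold Pre_clumping_kmers; infer_instance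

def pvWitness_clumping_kmers : String × Int × Int × Int := ("ATATGATGATAT", 3, 10, 2)

def Spec_clumping_kmers (genome : String) (kmer_length : Int) (window_length : Int) (min_kmer_count : Int) (out : List (String × List Int)) : Prop := out = clumping_kmers_alt genome kmer_length window_length min_kmer_count
instance (genome : String) (kmer_length : Int) (window_length : Int) (min_kmer_count : Int) (out : List (String × List Int)) : Decidable (Spec_clumping_kmers genome kmer_length window_length min_kmer_count out) := by unfold Spec_clumping_kmers; infer_instance

-- ===== CLAIM (what is proved, stated in full; the proofs are below) =====
def Claim_equal_clumping_kmers : Prop := ∀ (genome : String) (kmer_length : Int) (window_length : Int) (min_kmer_count : Int), Dom_clumping_kmers genome kmer_length window_length min_kmer_count → Pre_clumping_kmers genome kmer_length window_length min_kmer_count → Spec_clumping_kmers genome kmer_length window_length min_kmer_count (clumping_kmers genome kmer_length window_length min_kmer_count)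

-- ===== LEMMAS AND PROOFS =====

-- number of elements ≤ t; on a sorted list this is where bisect_right and the
-- two-pointer both stop
def pvCnt (locs : List Int) (t : Int) : Nat := locs.countP (fun x => decide (x ≤ t))

lemma pvCnt_le (locs : List Int) (t : Int) : pvCnt locs t ≤ locs.length :=
  List.countP_le_length

lemma pvCnt_mono (locs : List Int) {t t' : Int} (h : t ≤ t') :
    pvCnt locs t ≤ pvCnt locs t' := by
  apply List.countP_mono_left
  intro x _ hx
  simp only [decide_eq_true_eq] at *
  omega

lemma pvCnt_spec (locs : List Int) (t : Int) (hs : locs.Pairwise (· < ·)) :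
    ∀ i (hi : i < locs.length), (i < pvCnt locs t ↔ locs[i] ≤ t) := by
  induction locs with
  | nil => intro i hi; simp at hi
  | cons x xs ih =>
    rcases List.pairwise_cons.mp hs with ⟨hx, hxs⟩
    intro i hi
    have hcons : pvCnt (x :: xs) t = (if x ≤ t then 1 else 0) + pvCnt xs t := by
      by_cases h : x ≤ t <;>
        simp [pvCnt, h, Nat.add_comm]
    cases i with
    | zero =>
      simp only [List.getElem_cons_zero]
      by_cases h : x ≤ t
      · simp [hcons, h]
      · have hz : pvCnt xs t = 0 := by
          apply List.countP_eq_zero.mpr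
          intro y hy
          have := hx y hy
          simp only [decide_eq_true_eq]
          omega
        simp [hcons, h, hz]
    | succ i =>
      simp only [List.getElem_cons_succ]
      have hi' : i < xs.length := by simpa using hi
      by_cases h : x ≤ t
      · rw [hcons, if_pos h]
        rw [← ih hxs i hi']
        omega
      · have hz : pvCnt xs t = 0 := by
          apply List.countP_eq_zero.mpr
          intro y hy
          have := hx y hy
          simp only [decide_eq_true_eq]
          omega
        rw [hcons, if_neg h, hz]
        constructor
        · omega
        · intro hle
          exfalso
          have := hx _ (List.getElem_mem hi')
          omega

lemma pvBisect_eq (locs : List Int) (t : Int) (hs : locs.Pairwise (· < ·)) :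
    ∀ (d lo hi : Nat), hi - lo ≤ d → lo ≤ pvCnt locs t → pvCnt locs t ≤ hi →
      hi ≤ locs.length → pvBisectRight locs t lo hi = pvCnt locs t := by
  intro d
  induction d with
  | zero =>
    intro lo hi h1 h2 h3 h4
    rw [pvBisectRight, if_neg (by omega)]
    omega
  | succ d ih =>
    intro lo hi h1 h2 h3 h4
    by_cases hlt : lo < hi
    · rw [pvBisectRight, if_pos hlt]
      have hmid1 : lo ≤ (lo + hi) / 2 := by omega
      have hmid2 : (lo + hi) / 2 < hi := by omega
      have hmlen : (lo + hi) / 2 < locs.length := by omega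
      have hget : locs.getD ((lo + hi) / 2) 0 = locs[(lo + hi) / 2] := by
        rw [List.getD_eq_getElem?_getD, List.getElem?_eq_getElem hmlen]; rfl
      simp only [hget]
      by_cases hc : locs[(lo + hi) / 2] ≤ t
      · rw [if_pos hc]
        have : (lo + hi) / 2 < pvCnt locs t := (pvCnt_spec locs t hs _ hmlen).mpr hc
        exact ih _ _ (by omega) (by omega) h3 h4
      · rw [if_neg hc]
        have : ¬ ((lo + hi) / 2 < pvCnt locs t) := by
          intro hlt'
          exact hc ((pvCnt_spec locs t hs _ hmlen).mp hlt')
        exact ih _ _ (by omega) h2 (by omega) (by omega)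
    · rw [pvBisectRight, if_neg hlt]
      omega

lemma pvAdvance_eq (locs : List Int) (k W ev : Int) (hs : locs.Pairwise (· < ·)) :
    ∀ (d sp : Nat), locs.length - sp ≤ d → sp < locs.length →
      sp ≤ pvCnt locs (ev + k - W) → pvCnt locs (ev + k - W) < locs.length →
      pvAdvance locs k W ev sp (locs.getD sp 0) =
        (pvCnt locs (ev + k - W), locs.getD (pvCnt locs (ev + k - W)) 0) := by
  intro d
  induction d with
  | zero => intro sp h1; omega
  | succ d ih =>
    intro sp h1 h2 h3 h4
    have hget : locs.getD sp 0 = locs[sp] := by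
      rw [List.getD_eq_getElem?_getD, List.getElem?_eq_getElem h2]; rfl
    rw [pvAdvance, hget]
    by_cases hc : (ev + k) - locs[sp] ≥ W
    · rw [if_pos hc]
      have hsplt : sp < pvCnt locs (ev + k - W) :=
        (pvCnt_spec locs _ hs sp h2).mpr (by omega)
      have hsp1 : sp + 1 < locs.length := by omega
      rw [List.getElem?_eq_getElem hsp1]
      have hg1 : locs[sp + 1] = locs.getD (sp + 1) 0 := by
        rw [List.getD_eq_getElem?_getD, List.getElem?_eq_getElem hsp1]; rfl
      rw [hg1]
      exact ih (sp + 1) (by omega) hsp1 (by omega) h4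
    · rw [if_neg hc]
      have : ¬ (sp < pvCnt locs (ev + k - W)) := by
        intro hlt'
        have := (pvCnt_spec locs _ hs sp h2).mp hlt'
        omega
      have hspc : sp = pvCnt locs (ev + k - W) := by omega
      subst hspc
      rw [← hget]

def pvStepA (locs : List Int) (k W m : Int) (st : Nat × Int × List Int) (ep : Int) :
    Nat × Int × List Int :=
  let ev := PySem.List.pyGetD locs ep 0
  let p := pvAdvance locs k W ev st.1 st.2.1
  if (ep - (p.1 : Int)) + 1 > m then (p.1, p.2, st.2.2 ++ [p.2])
  else (p.1, p.2, st.2.2)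

def pvStepB (locs : List Int) (k W m : Int) (acc : List Int) (ep : Int) : List Int :=
  let threshold := PySem.List.pyGetD locs ep 0 + k - W
  let i := pvBisectRight locs threshold 0 locs.length
  let sv := PySem.List.pyGetD locs (i : Int) 0
  if (ep - (i : Int)) + 1 > m then acc ++ [sv] else acc

lemma pvInner_eq (locs : List Int) (k W m : Int) (hk : k < W)
    (hs : locs.Pairwise (· < ·)) :
    ∀ (d a sp : Nat) (acc : List Int), locs.length - a ≤ d → a ≤ locs.length →
      sp < locs.length →
      (a < locs.length → sp ≤ pvCnt locs (locs.getD a 0 + k - W)) →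
      ((PySem.List.pyRange (a : Int) (locs.length : Int) 1).foldl (pvStepA locs k W m)
        ((sp, locs.getD sp 0, acc) : Nat × Int × List Int)).2.2 =
      (PySem.List.pyRange (a : Int) (locs.length : Int) 1).foldl (pvStepB locs k W m) acc := by
  intro d
  induction d with
  | zero =>
    intro a sp acc h1 h2 h3 h4
    rw [PySem.List.pyRange_one_eq_nil (by omega)]
    rfl
  | succ d ih =>
    intro a sp acc h1 h2 h3 h4
    by_cases ha : a < locs.length
    · rw [PySem.List.pyRange_one_cons (by exact_mod_cast ha)]
      simp only [List.foldl_cons]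
      have hga : locs.getD a 0 = locs[a] := by
        rw [List.getD_eq_getElem?_getD, List.getElem?_eq_getElem ha]; rfl
      set t := locs.getD a 0 + k - W with ht
      set c := pvCnt locs t with hc
      have hca : c ≤ a := by
        by_contra hcon
        have := (pvCnt_spec locs t hs a ha).mp (by omega)
        rw [hga] at ht
        omega
      have hclen : c < locs.length := by omega
      have hadv : pvAdvance locs k W (PySem.List.pyGetD locs (a : Int) 0) sp (locs.getD sp 0)
          = (c, locs.getD c 0) := by
        rw [PySem.List.pyGetD_natCast]
        exact pvAdvance_eq locs k W _ hs locs.length sp (by omega) h3 (h4 ha) hclen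
      have hbis : pvBisectRight locs (locs.getD a 0 + k - W) 0 locs.length = c := by
        exact pvBisect_eq locs t hs locs.length 0 locs.length (by omega) (by omega)
          (pvCnt_le locs t) le_rfl
      have hA : pvStepA locs k W m (sp, locs.getD sp 0, acc) (a : Int) =
          (c, locs.getD c 0,
            if ((a : Int) - (c : Int)) + 1 > m then acc ++ [locs.getD c 0] else acc) := by
        simp only [pvStepA, hadv]
        split_ifs <;> rfl
      have hB : pvStepB locs k W m acc (a : Int) =
          (if ((a : Int) - (c : Int)) + 1 > m then acc ++ [locs.getD c 0] else acc) := by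
        simp only [pvStepB, PySem.List.pyGetD_natCast, hbis]
      rw [hA, hB]
      have hcast : (a : Int) + 1 = ((a + 1 : Nat) : Int) := by push_cast; ring
      rw [hcast]
      have hnext : a + 1 < locs.length → c ≤ pvCnt locs (locs.getD (a + 1) 0 + k - W) := by
        intro ha1
        have hga1 : locs.getD (a + 1) 0 = locs[a + 1] := by
          rw [List.getD_eq_getElem?_getD, List.getElem?_eq_getElem ha1]; rfl
        have hlt : locs[a] < locs[a + 1] :=
          List.pairwise_iff_getElem.mp hs a (a + 1) ha ha1 (by omega)
        rw [hc, ht, hga]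
        exact pvCnt_mono locs (by rw [hga1]; omega)
      exact ih (a + 1) c _ (by omega) (by omega) hclen hnext
    · rw [PySem.List.pyRange_one_eq_nil (by exact_mod_cast (by omega : (locs.length : Int) ≤ (a : Int)))]
      rfl

lemma pvBuild_keys (g : String) (k : Int) :
    (pvBuildKmers g k).keys =
      PySem.Set.ofList ((PySem.List.pyRange 0 (PySem.Str.len g - k + 1) 1).map (pvKmerAt g k)) := by
  rw [pvBuildKmers,
    PySem.Dict.keys_foldl_modify_key _ (pvKmerAt g k) [] (fun _ s => (fun l => l ++ [s]))]
  simp [PySem.Set.update_nil_left]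

lemma pvBuild_nodup (g : String) (k : Int) : (pvBuildKmers g k).keys.Nodup := by
  rw [pvBuild_keys]; exact PySem.Set.nodup_ofList _

lemma pvBuild_getD (g : String) (k : Int) (c : String) :
    (pvBuildKmers g k).getD c [] =
      (PySem.List.pyRange 0 (PySem.Str.len g - k + 1) 1).filter (fun s => pvKmerAt g k s == c) := by
  have h : pvBuildKmers g k =
      ((PySem.List.pyRange 0 (PySem.Str.len g - k + 1) 1).map
        (fun s => (pvKmerAt g k s, s))).foldl
        (fun d p => d.modify p.1 [] (fun l => l ++ [p.2])) PySem.Dict.empty := by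
    rw [List.foldl_map]; rfl
  rw [h, PySem.Dict.getD_foldl_modify_append]
  simp [List.filter_map, Function.comp_def]

lemma pvBuild_items (g : String) (k : Int) :
    (pvBuildKmers g k).items =
      (PySem.Set.ofList ((PySem.List.pyRange 0 (PySem.Str.len g - k + 1) 1).map
        (pvKmerAt g k))).map
        (fun c => (c, (PySem.List.pyRange 0 (PySem.Str.len g - k + 1) 1).filter
          (fun s => pvKmerAt g k s == c))) := by
  rw [PySem.Dict.items_eq_map_keys _ (pvBuild_nodup g k) [], pvBuild_keys]
  exact List.map_congr_left (fun c _ => by rw [pvBuild_getD])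

lemma pvItem_facts (g : String) (k : Int) {kv : String × List Int}
    (h : kv ∈ (pvBuildKmers g k).items) :
    kv.2 = (PySem.List.pyRange 0 (PySem.Str.len g - k + 1) 1).filter
        (fun s => pvKmerAt g k s == kv.1) ∧
      ∃ s ∈ PySem.List.pyRange 0 (PySem.Str.len g - k + 1) 1, pvKmerAt g k s = kv.1 := by
  rw [pvBuild_items] at h
  rcases List.mem_map.mp h with ⟨c, hc, hceq⟩
  have hc' : c ∈ (PySem.List.pyRange 0 (PySem.Str.len g - k + 1) 1).map (pvKmerAt g k) :=
    (PySem.Set.mem_ofList _ _).mp hc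
  rcases List.mem_map.mp hc' with ⟨s, hs, hseq⟩
  constructor
  · rw [← hceq]
  · exact ⟨s, hs, by rw [hseq, ← hceq]⟩

-- ===== VERDICT (by name: the statement is the Claim_ definition above) =====
theorem clumping_kmers_spec : Claim_equal_clumping_kmers := by
  intro g k W m _ hpre
  unfold Spec_clumping_kmers clumping_kmers clumping_kmers_alt
  simp only []
  congr 1
  apply PySem.List.foldl_congr_mem
  intro out kv hkv
  rcases pvItem_facts g k hkv with ⟨hloc, s₀, hs₀, hkey⟩
  by_cases hlen : PySem.List.len kv.2 < m
  · simp only [if_pos hlen]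
  · simp only [if_neg hlen]
    have hsort : kv.2.Pairwise (· < ·) := by
      rw [hloc]
      exact (PySem.List.pairwise_lt_pyRange_one _ _).filter _
    have hmem : s₀ ∈ kv.2 := by
      rw [hloc]
      exact List.mem_filter.mpr ⟨hs₀, by simp [hkey]⟩
    have hne : 0 < kv.2.length := List.length_pos_of_mem hmem
    have hkW : k < W := by
      rcases hpre with hkW | hcnt
      · exact hkW
      · exfalso
        apply hlen
        have := hcnt s₀ hs₀
        rw [PySem.List.len_eq, hloc, ← List.countP_eq_length_filter]
        have hpeq : (fun s => pvKmerAt g k s == kv.1) =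
            (fun j => PySem.Str.slice g (some j) (some (j + k)) ==
              PySem.Str.slice g (some s₀) (some (s₀ + k))) := by
          funext j
          rw [← hkey]
          rfl
        rw [hpeq]
        exact this
    have hstepA : (fun (st : Nat × Int × List Int) (ep : Int) =>
        let ev := PySem.List.pyGetD kv.2 ep 0
        let p := pvAdvance kv.2 k W ev st.1 st.2.1
        if (ep - (p.1 : Int)) + 1 > m then (p.1, p.2, st.2.2 ++ [p.2])
        else (p.1, p.2, st.2.2)) = pvStepA kv.2 k W m := rfl
    have hstepB : (fun (acc : List Int) (ep : Int) =>
        let threshold := PySem.List.pyGetD kv.2 ep 0 + k - W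
        let i := pvBisectRight kv.2 threshold 0 kv.2.length
        let sv := PySem.List.pyGetD kv.2 (i : Int) 0
        if (ep - (i : Int)) + 1 > m then acc ++ [sv] else acc) = pvStepB kv.2 k W m := rfl
    have hinner := pvInner_eq kv.2 k W m hkW hsort kv.2.length 0 0 []
      (by omega) (by omega) hne (fun _ => Nat.zero_le _)
    simp only [Nat.cast_zero, PySem.List.pyGetD_zero] at hinner ⊢
    rw [PySem.List.len_eq, hstepA, hstepB, hinner]
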